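-- pv_equiv track=rewrite | github.com/FlorianRamakers123/Inverse-General-Game-Playing | paper_evaluation/testpy.py | convert_to_metagol_body
-- ===== SOURCE A (Python) =====
-- def convert_to_metagol_body(body, delimeter):
--         if body.endswith("."):
--             body=body[:-1]
--
--         body_parts = []
--         parenth_level = 0
--         current_string = ""
--         for i in range(len(body)):
--             current_char = body[i]
--             if current_char == '(':
--                 parenth_level += 1
--                 if i < 2 or body[i-3:i] != "not":
--                     current_char += "A,"
--             elif current_char == ')':
--                 parenth_level -= 1
--             elif current_char == ',' and parenth_level == 0:
--                 body_parts.append(current_string)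
--                 current_string = ""
--                 continue
--             current_string += current_char
--             if i == len(body) - 1:
--                 body_parts.append(current_string)
--
--         body_parts = ["my_" + x.strip() for x in body_parts]
--         return  (delimeter + " ").join(body_parts)	+ "."
-- ===== SOURCE B (Python) =====
-- # Split-then-transform: first split into top-level segments, then insert "A," per segment.
-- def _split_top_level(body):
--     segments = []
--     depth = 0
--     start = 0
--     for i in range(len(body)):
--         c = body[i]
--         if c == '(':
--             depth += 1
--         elif c == ')':
--             depth -= 1
--         elif c == ',' and depth == 0:
--             segments.append(body[start:i])
--             start = i + 1
--     if start < len(body):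
--         segments.append(body[start:])
--     return segments
--
--
-- def _insert_args(seg):
--     out = []
--     for i, c in enumerate(seg):
--         out.append(c)
--         if c == '(' and seg[max(0, i - 3):i] != "not":
--             out.append("A,")
--     return "".join(out)
--
--
-- def convert_to_metagol_body(body, delimeter):
--     if body.endswith("."):
--         body = body[:-1]
--     segments = _split_top_level(body)
--     parts = ["my_" + _insert_args(seg).strip() for seg in segments]
--     return (delimeter + " ").join(parts) + "."
-- ===== Notes on version B (the rewrite author's own statement) =====
-- stated objective: alternative
-- what changed: A's single interleaved loop (splitting at top-level commas while simultaneously inserting 'A,' after non-'not' parentheses, with an end-of-loop flush inside the loop) is decomposed into two separate passes: one depth-tracking pass that slices the body into top-level segments, then an independent per-segment pass that inserts 'A,' after each '(' not preceded by 'not'.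
import Mathlib
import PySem

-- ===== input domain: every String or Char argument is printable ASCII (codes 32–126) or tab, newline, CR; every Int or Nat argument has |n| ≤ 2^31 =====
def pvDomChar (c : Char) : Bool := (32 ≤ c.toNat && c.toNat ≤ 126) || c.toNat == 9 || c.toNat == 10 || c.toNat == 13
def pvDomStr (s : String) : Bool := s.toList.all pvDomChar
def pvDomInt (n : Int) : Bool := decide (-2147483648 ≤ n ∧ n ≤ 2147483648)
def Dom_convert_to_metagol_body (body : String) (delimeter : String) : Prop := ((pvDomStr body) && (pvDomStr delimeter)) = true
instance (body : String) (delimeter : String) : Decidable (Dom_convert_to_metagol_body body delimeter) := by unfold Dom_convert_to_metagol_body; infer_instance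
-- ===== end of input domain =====

-- B re-implements A by two separate passes (top-level split, then per-segment "A,"-insertion)
-- instead of A's single interleaved loop; same return value, similar cost (objective: alternative).

-- ===== PORT A =====
-- the loop 'for i in range(len(body))' with state (body_parts, parenth_level, current_string)
def cmbA_loop (bs : List Char) (i : Nat) (parts : List (List Char)) (level : Int)
    (cur : List Char) : List (List Char) :=
  if h : i < bs.length then
    let c := bs[i]
    if c = '(' then
      -- current_char += "A,"  unless  i >= 2 and body[i-3:i] == "not"
      let cur' := cur ++ (if i < 2 ∨ PySem.List.slice bs (some ((i : Int) - 3)) (some (i : Int)) ≠ ['n','o','t'] then [c, 'A', ','] else [c])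
      cmbA_loop bs (i+1) (if i = bs.length - 1 then parts ++ [cur'] else parts) (level + 1) cur'
    else if c = ')' then
      let cur' := cur ++ [c]
      cmbA_loop bs (i+1) (if i = bs.length - 1 then parts ++ [cur'] else parts) (level - 1) cur'
    else if c = ',' ∧ level = 0 then
      -- the 'continue' skips the end-of-loop append
      cmbA_loop bs (i+1) (parts ++ [cur]) level []
    else
      let cur' := cur ++ [c]
      cmbA_loop bs (i+1) (if i = bs.length - 1 then parts ++ [cur'] else parts) level cur'
  else parts
termination_by bs.length - i

def convert_to_metagol_body (body : String) (delimeter : String) : String :=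
  let bs := if PySem.Str.endswith body "." then PySem.List.slice body.toList none (some (-1)) else body.toList
  let parts := cmbA_loop bs 0 [] 0 []
  let parts := parts.map (fun x => ['m','y','_'] ++ PySem.Chars.strip x)
  String.ofList (PySem.Chars.join (delimeter.toList ++ [' ']) parts ++ ['.'])

-- ===== PORT B =====
-- _split_top_level: segments are slices body[start:i] between the top-level commas
def cmbB_split (bs : List Char) (i : Nat) (depth : Int) (start : Nat) : List (List Char) :=
  if h : i < bs.length then
    let c := bs[i]
    if c = '(' then cmbB_split bs (i+1) (depth + 1) start
    else if c = ')' then cmbB_split bs (i+1) (depth - 1) start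
    else if c = ',' ∧ depth = 0 then
      PySem.List.slice bs (some (start : Int)) (some (i : Int)) :: cmbB_split bs (i+1) depth (i+1)
    else cmbB_split bs (i+1) depth start
  else if start < bs.length then [PySem.List.slice bs (some (start : Int)) none] else []
termination_by bs.length - i

-- _insert_args: append "A," after '(' unless seg[max(0, i-3):i] == "not"
def cmbB_insertA (seg : List Char) : List Char :=
  (PySem.List.enumerate seg 0).foldl (fun out p =>
    out ++ ([p.2] ++ (if p.2 = '(' ∧ PySem.List.slice seg (some (max 0 (p.1 - 3))) (some p.1) ≠ ['n','o','t'] then ['A', ','] else []))) []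

def convert_to_metagol_body_alt (body : String) (delimeter : String) : String :=
  let bs := if PySem.Str.endswith body "." then PySem.List.slice body.toList none (some (-1)) else body.toList
  let segments := cmbB_split bs 0 0 0
  let parts := segments.map (fun seg => ['m','y','_'] ++ PySem.Chars.strip (cmbB_insertA seg))
  String.ofList (PySem.Chars.join (delimeter.toList ++ [' ']) parts ++ ['.'])

-- ===== PRECONDITION & SPEC =====
def Spec_convert_to_metagol_body (body : String) (delimeter : String) (out : String) : Prop := out = convert_to_metagol_body_alt body delimeter
instance (body : String) (delimeter : String) (out : String) : Decidable (Spec_convert_to_metagol_body body delimeter out) := by unfold Spec_convert_to_metagol_body; infer_instance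

-- ===== CLAIM (what is proved, stated in full; the proofs are below) =====
def Claim_equal_convert_to_metagol_body : Prop := ∀ (body : String) (delimeter : String), Dom_convert_to_metagol_body body delimeter → Spec_convert_to_metagol_body body delimeter (convert_to_metagol_body body delimeter)

-- ===== LEMMAS AND PROOFS =====

-- What A appends to current_string at index i (the non-'continue' branches).
def insStep (bs : List Char) (i : Nat) : List Char :=
  if bs.getD i ' ' = '(' then
    (if i < 2 ∨ PySem.List.slice bs (some ((i : Int) - 3)) (some (i : Int)) ≠ ['n','o','t'] then [bs.getD i ' ', 'A', ','] else [bs.getD i ' '])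
  else [bs.getD i ' ']

-- A's current_string when the current segment started at `start` and the loop is at `i`.
def insGlob (bs : List Char) (start i : Nat) : List Char :=
  (List.range' start (i - start)).flatMap (insStep bs)

-- B's _insert_args step on a segment, with Nat indices.
def segStep (seg : List Char) (k : Nat) : List Char :=
  [seg.getD k ' '] ++ (if seg.getD k ' ' = '(' ∧ (seg.drop (k - 3)).take (k - (k - 3)) ≠ ['n','o','t'] then ['A', ','] else [])

-- segment-start boundary: either the whole body, or the char before `start` is a top-level comma
def Bnd (bs : List Char) (start : Nat) : Prop := start = 0 ∨ bs[start - 1]? = some ','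

lemma insGlob_self (bs : List Char) (s : Nat) : insGlob bs s s = [] := by
  simp [insGlob]

lemma insGlob_succ (bs : List Char) (start i : Nat) (h : start ≤ i) :
    insGlob bs start (i+1) = insGlob bs start i ++ insStep bs i := by
  have h1 : i + 1 - start = (i - start) + 1 := by omega
  have h2 : start + 1 * (i - start) = i := by omega
  rw [insGlob, h1, List.range'_concat, List.flatMap_append, h2, ← insGlob]
  simp

lemma segStep_take (u : List Char) (m k : Nat) (h : k < m) :
    segStep (u.take m) k = segStep u k := by
  have hg : (u.take m).getD k ' ' = u.getD k ' ' := by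
    simp [List.getD, List.getElem?_take_of_lt h]
  have hd : ((u.take m).drop (k - 3)).take (k - (k - 3)) = (u.drop (k - 3)).take (k - (k - 3)) := by
    rw [List.drop_take, List.take_take]
    have : min (k - (k - 3)) (m - (k - 3)) = k - (k - 3) := by omega
    rw [this]
  rw [segStep, segStep, hg, hd]

-- B's _insert_args as a flatMap over the segment positions
lemma insertA_eq_flatMap (seg : List Char) :
    cmbB_insertA seg = (List.range seg.length).flatMap (segStep seg) := by
  rw [cmbB_insertA, PySem.List.foldl_append_eq_flatMap]
  rw [PySem.List.enumerate_eq_map_pyRange seg ' ', PySem.List.len_eq, PySem.List.pyRange_one]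
  simp only [Int.sub_zero, Int.toNat_natCast, List.flatMap_map, List.nil_append]
  apply List.flatMap_congr
  intro k _
  simp only [zero_add, PySem.List.pyGetD_natCast]
  have hmax : max 0 ((k : Int) - 3) = ((k - 3 : Nat) : Int) := by omega
  rw [hmax, PySem.List.slice_natCast, segStep]

-- the key window lemma: A's global step at j equals B's per-segment step
lemma segStep_eq_insStep (bs : List Char) (start j : Nat) (hb : Bnd bs start)
    (hsj : start ≤ j) (hj : j < bs.length) :
    segStep (bs.drop start) (j - start) = insStep bs j := by
  have hg : (bs.drop start).getD (j - start) ' ' = bs.getD j ' ' := by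
    rw [List.getD_eq_getElem?_getD, List.getD_eq_getElem?_getD, List.getElem?_drop,
      show start + (j - start) = j from by omega]
  rw [segStep, insStep, hg]
  by_cases hc : bs.getD j ' ' = '('
  · -- windows: V is B's per-segment one, W is A's global one
    have hV : ((bs.drop start).drop (j - start - 3)).take (j - start - (j - start - 3))
        = (bs.drop (start + (j - start - 3))).take (j - start - (j - start - 3)) := by
      rw [List.drop_drop, Nat.add_comm]
    rw [hV]
    have hiff : (j < 2 ∨ PySem.List.slice bs (some ((j : Int) - 3)) (some (j : Int)) ≠ ['n', 'o', 't'])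
        ↔ ((bs.drop (start + (j - start - 3))).take (j - start - (j - start - 3)) ≠ ['n', 'o', 't']) := by
      by_cases hn3 : 3 ≤ j - start
      · -- deep inside the segment: both windows are bs[j-3:j]
        have hW : PySem.List.slice bs (some ((j : Int) - 3)) (some (j : Int)) = (bs.drop (j - 3)).take 3 := by
          rw [show (j : Int) - 3 = ((j - 3 : Nat) : Int) from by omega, PySem.List.slice_natCast,
            show j - (j - 3) = 3 from by omega]
        rw [hW, show start + (j - start - 3) = j - 3 from by omega,
          show j - start - (j - start - 3) = 3 from by omega]
        have : ¬ j < 2 := by omega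
        simp [this]
      · -- segment-local index < 3: both sides hold
        have hBwin : (bs.drop (start + (j - start - 3))).take (j - start - (j - start - 3)) ≠ ['n', 'o', 't'] := by
          intro hw
          have := congrArg List.length hw
          simp [List.length_take, List.length_drop] at this
          omega
        refine iff_of_true ?_ hBwin
        by_cases hj2 : j < 2
        · exact Or.inl hj2
        · right
          by_cases hj3 : 3 ≤ j
          · -- start ≥ 1 and the comma at start-1 lies inside the 3-char window
            have hcomma : bs[start - 1]? = some ',' := by
              rcases hb with h0 | h0
              · omega
              · exact h0
            rw [show (j : Int) - 3 = ((j - 3 : Nat) : Int) from by omega, PySem.List.slice_natCast,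
              show j - (j - 3) = 3 from by omega]
            intro hw
            have hm : start - 1 - (j - 3) < 3 := by omega
            have hidx : ((bs.drop (j - 3)).take 3)[start - 1 - (j - 3)]? = some ',' := by
              rw [List.getElem?_take_of_lt hm, List.getElem?_drop,
                show j - 3 + (start - 1 - (j - 3)) = start - 1 from by omega]
              exact hcomma
            rw [hw] at hidx
            interval_cases h : (start - 1 - (j - 3)) <;> simp_all
          · -- j = 2: the slice bs[-1:2] is empty (body has length ≥ 3 here)
            have hj : j = 2 := by omega
            subst hj
            intro hw
            have hl := congrArg List.length hw
            rw [PySem.List.length_slice,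
              show ((2 : Nat) : Int) - 3 = -1 from by norm_num, PySem.List.clampIdx_neg_one,
              PySem.List.clampIdx_natCast] at hl
            simp at hl
            omega
    by_cases hV3 : (bs.drop (start + (j - start - 3))).take (j - start - (j - start - 3)) = ['n', 'o', 't']
    · have hW : ¬ (j < 2 ∨ PySem.List.slice bs (some ((j : Int) - 3)) (some (j : Int)) ≠ ['n', 'o', 't']) := by
        rw [hiff]; simpa using hV3
      rw [if_neg hW, if_neg (by intro hand; exact hand.2 hV3), if_pos hc]
      simp
    · rw [if_pos (⟨hc, hV3⟩ : _ ∧ _), if_pos hc, if_pos (hiff.mpr hV3)]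
      simp
  · have hfalse : ¬ (bs.getD j ' ' = '(' ∧ ((bs.drop start).drop (j - start - 3)).take (j - start - (j - start - 3)) ≠ ['n', 'o', 't']) := fun h => hc h.1
    rw [if_neg hc, if_neg hfalse]
    simp

-- B's transformed segment [start:j] equals A's accumulated current_string
lemma L1 (bs : List Char) (start : Nat) (hb : Bnd bs start) :
    ∀ j, start ≤ j → j ≤ bs.length →
    (List.range (j - start)).flatMap (segStep ((bs.drop start).take (j - start))) = insGlob bs start j := by
  intro j hsj
  induction j, hsj using Nat.le_induction with
  | base => intro _; simp [insGlob]
  | succ j hj ih =>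
    intro hlen
    have hn : j + 1 - start = (j - start) + 1 := by omega
    rw [hn, List.range_succ, List.flatMap_append]
    have hcg : ∀ m, j - start ≤ m →
        (List.range (j - start)).flatMap (segStep ((bs.drop start).take m))
        = (List.range (j - start)).flatMap (segStep (bs.drop start)) := by
      intro m hm
      apply List.flatMap_congr
      intro k hk
      have hk' : k < m := by simp [List.mem_range] at hk; omega
      exact segStep_take _ _ _ hk'
    rw [hcg _ (by omega), ← hcg _ (le_refl _), ih (by omega), insGlob_succ bs start j hj]
    congr 1
    simp only [List.flatMap_singleton]
    rw [segStep_take _ _ _ (by omega)]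
    exact segStep_eq_insStep bs start j hb hj (by omega)

lemma insertA_slice (bs : List Char) (start j : Nat) (hb : Bnd bs start)
    (hsj : start ≤ j) (hj : j ≤ bs.length) :
    cmbB_insertA ((bs.drop start).take (j - start)) = insGlob bs start j := by
  rw [insertA_eq_flatMap]
  have hlen : ((bs.drop start).take (j - start)).length = j - start := by
    simp [List.length_take, List.length_drop]; omega
  rw [hlen]
  exact L1 bs start hb j hsj hj

-- main induction: A's loop from position i equals parts ++ transformed split-from-i
lemma main_loop (bs : List Char) :
    ∀ n i parts level start, bs.length - i ≤ n → start ≤ i → i ≤ bs.length → Bnd bs start →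
    (i = bs.length → start = bs.length) →
    cmbA_loop bs i parts level (insGlob bs start i)
      = parts ++ (cmbB_split bs i level start).map cmbB_insertA := by
  intro n
  induction n with
  | zero =>
    intro i parts level start hn hsi hil hb hend
    have hi : i = bs.length := by omega
    have hs : start = bs.length := hend hi
    rw [cmbA_loop, cmbB_split]
    simp [hi, hs]
  | succ n ih =>
    intro i parts level start hn hsi hil hb hend
    by_cases hi : i < bs.length
    · have hgd : bs.getD i ' ' = bs[i] := List.getD_eq_getElem bs ' ' hi
      rw [cmbA_loop, cmbB_split]
      simp only [dif_pos hi]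
      by_cases hc1 : bs[i] = '('
      · simp only [if_pos hc1]
        have hstep : insGlob bs start i ++ (if i < 2 ∨ PySem.List.slice bs (some ((i : Int) - 3)) (some (i : Int)) ≠ ['n','o','t'] then [bs[i], 'A', ','] else [bs[i]]) = insGlob bs start (i + 1) := by
          rw [insGlob_succ bs start i hsi]
          congr 1
          rw [insStep, hgd, if_pos hc1]
        by_cases hlast : i + 1 = bs.length
        · have hl : i = bs.length - 1 := by omega
          rw [if_pos hl, cmbA_loop]
          rw [dif_neg (by omega)]
          rw [cmbB_split, dif_neg (by omega), if_pos (by omega : start < bs.length)]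
          rw [PySem.List.slice_from_natCast]
          have hfull : cmbB_insertA (bs.drop start) = insGlob bs start bs.length := by
            have htk : (bs.drop start).take (bs.length - start) = bs.drop start := by
              apply List.take_of_length_le
              simp
            have := insertA_slice bs start bs.length hb (by omega) (le_refl _)
            rwa [htk] at this
          rw [hstep, List.map_cons, List.map_nil, hfull]
          rw [show insGlob bs start (i + 1) = insGlob bs start bs.length by rw [hlast]]
        · rw [if_neg (by omega), hstep]
          rw [ih (i+1) parts (level+1) start (by omega) (by omega) (by omega) hb (fun h => absurd h hlast)]
      · simp only [if_neg hc1]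
        by_cases hc2 : bs[i] = ')'
        · simp only [if_pos hc2]
          have hstep : insGlob bs start i ++ [bs[i]] = insGlob bs start (i + 1) := by
            rw [insGlob_succ bs start i hsi]
            congr 1
            rw [insStep, hgd, if_neg hc1]
          by_cases hlast : i + 1 = bs.length
          · have hl : i = bs.length - 1 := by omega
            rw [if_pos hl, cmbA_loop, dif_neg (by omega)]
            rw [cmbB_split, dif_neg (by omega), if_pos (by omega : start < bs.length)]
            rw [PySem.List.slice_from_natCast]
            have hfull : cmbB_insertA (bs.drop start) = insGlob bs start bs.length := by
              have htk : (bs.drop start).take (bs.length - start) = bs.drop start := by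
                apply List.take_of_length_le
                simp
              have := insertA_slice bs start bs.length hb (by omega) (le_refl _)
              rwa [htk] at this
            rw [hstep, List.map_cons, List.map_nil, hfull]
            rw [show insGlob bs start (i + 1) = insGlob bs start bs.length by rw [hlast]]
          · rw [if_neg (by omega), hstep]
            rw [ih (i+1) parts (level-1) start (by omega) (by omega) (by omega) hb (fun h => absurd h hlast)]
        · simp only [if_neg hc2]
          by_cases hc3 : bs[i] = ',' ∧ level = 0
          · simp only [if_pos hc3]
            have hb' : Bnd bs (i + 1) := by
              right
              simp only [Nat.add_sub_cancel]
              rw [List.getElem?_eq_getElem hi, hc3.1]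
            rw [show ([] : List Char) = insGlob bs (i+1) (i+1) from (insGlob_self bs (i+1)).symm]
            rw [ih (i+1) (parts ++ [insGlob bs start i]) level (i+1) (by omega) (by omega) (by omega) hb' (fun h => h)]
            rw [PySem.List.slice_natCast]
            rw [List.map_cons, insertA_slice bs start i hb hsi (by omega)]
            simp
          · simp only [if_neg hc3]
            have hstep : insGlob bs start i ++ [bs[i]] = insGlob bs start (i + 1) := by
              rw [insGlob_succ bs start i hsi]
              congr 1
              rw [insStep, hgd, if_neg hc1]
            by_cases hlast : i + 1 = bs.length
            · have hl : i = bs.length - 1 := by omega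
              rw [if_pos hl, cmbA_loop, dif_neg (by omega)]
              rw [cmbB_split, dif_neg (by omega), if_pos (by omega : start < bs.length)]
              rw [PySem.List.slice_from_natCast]
              have hfull : cmbB_insertA (bs.drop start) = insGlob bs start bs.length := by
                have htk : (bs.drop start).take (bs.length - start) = bs.drop start := by
                  apply List.take_of_length_le
                  simp
                have := insertA_slice bs start bs.length hb (by omega) (le_refl _)
                rwa [htk] at this
              rw [hstep, List.map_cons, List.map_nil, hfull]
              rw [show insGlob bs start (i + 1) = insGlob bs start bs.length by rw [hlast]]
            · rw [if_neg (by omega), hstep]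
              rw [ih (i+1) parts level start (by omega) (by omega) (by omega) hb (fun h => absurd h hlast)]
    · have hi' : i = bs.length := by omega
      rw [cmbA_loop, cmbB_split]
      simp [hi', hend hi']

-- ===== VERDICT (by name: the statement is the Claim_ definition above) =====
theorem convert_to_metagol_body_spec : Claim_equal_convert_to_metagol_body := by
  intro body delimeter _
  unfold Spec_convert_to_metagol_body
  have h := main_loop (if PySem.Str.endswith body "." then PySem.List.slice body.toList none (some (-1)) else body.toList)
    (if PySem.Str.endswith body "." then PySem.List.slice body.toList none (some (-1)) else body.toList).length
    0 [] 0 0 (by omega) (by omega) (by omega) (Or.inl rfl) (fun h => h ▸ rfl)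
  rw [insGlob_self] at h
  simp only [convert_to_metagol_body, convert_to_metagol_body_alt]
  rw [h]
  simp [List.map_map, Function.comp_def]
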